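-- pv_equiv track=rewrite | github.com/oigomezz/Retos | Hackerearth/Algorithms/String-Algorithm/String-Manipulation/Unique-Substrings/solution.py | solve
-- ===== SOURCE A (Python) =====
-- def solve(string, k):
--     final_string = list(string)
--     for i in range(len(final_string)):
--         substring = final_string[i:i+k]
--         for j in range(1, len(substring)):
--             if substring[j] == substring[0]:
--                 substring[j] = "#"
--         final_string[i:i+k] = substring
--     return final_string.count("#")
-- ===== SOURCE B (Python) =====
-- def solve(string, k):
--     # One pass: per character keep the nearest "active" (unmarked) earlier position;
--     # a position is marked iff some active earlier equal char lies within distance k-1.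
--     last_active = {}
--     count = 0
--     for p, c in enumerate(string):
--         if c == '#':
--             count += 1
--         else:
--             q = last_active.get(c)
--             if q is not None and p - q <= k - 1:
--                 count += 1
--             else:
--                 last_active[c] = p
--     return count
-- ===== Notes on version B (the rewrite author's own statement) =====
-- stated objective: faster
-- what changed: Replaces the O(n*k) sliding-window simulation (copying, marking and writing back a k-slice at every index) by a single pass that keeps, per character, the nearest still-unmarked earlier position and counts a mark when that position is within distance k-1.
-- outside the precondition, e.g. on solve('aab', -1): A returns 1, B returns 0
import Mathlib
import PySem

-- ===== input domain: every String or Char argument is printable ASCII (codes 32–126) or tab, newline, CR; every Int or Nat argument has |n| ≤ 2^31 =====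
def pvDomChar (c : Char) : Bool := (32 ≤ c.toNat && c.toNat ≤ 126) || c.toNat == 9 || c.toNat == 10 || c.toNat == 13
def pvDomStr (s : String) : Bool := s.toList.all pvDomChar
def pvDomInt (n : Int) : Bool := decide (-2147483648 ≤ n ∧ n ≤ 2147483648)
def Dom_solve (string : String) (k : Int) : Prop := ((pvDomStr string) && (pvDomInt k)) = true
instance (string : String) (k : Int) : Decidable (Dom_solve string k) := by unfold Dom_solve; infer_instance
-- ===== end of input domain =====

-- B replaces A's O(n*k) sliding-window simulation by one O(n) pass tracking, per character,
-- the nearest still-unmarked earlier position (objective: faster, measured asymptotic).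


-- ===== PORT A =====
-- 'for j in range(1, len(substring)): if substring[j] == substring[0]: substring[j] = "#"'
-- (substring[j] = "#": j is a valid index here, so List.set on j.toNat is exact)
def solveMark (sub : List Char) : List Char :=
  (PySem.List.pyRange 1 (sub.length : Int)).foldl
    (fun s j => if PySem.List.pyGetD s j ' ' = PySem.List.pyGetD s 0 ' ' then s.set j.toNat '#' else s)
    sub

-- hand port of Python's step-1 slice ASSIGNMENT 'l[a:b] = sub': both bounds clamp to [0, len]
-- (negative bounds count from the end), the stop bound is floored at the start bound; exact per CPython.
def solveAssign (l : List Char) (a b : Int) (sub : List Char) : List Char :=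
  let lo := PySem.List.clampIdx l.length a
  let hi := max lo (PySem.List.clampIdx l.length b)
  l.take lo ++ sub ++ l.drop hi

def solveBody (k : Int) (l : List Char) (i : Nat) : List Char :=
  let sub := PySem.List.slice l (some (i : Int)) (some ((i : Int) + k))
  let sub := solveMark sub
  solveAssign l (i : Int) ((i : Int) + k) sub

def solve (string : String) (k : Int) : Int :=
  let fs := string.toList
  let fs := (List.range fs.length).foldl (solveBody k) fs
  (PySem.List.count fs '#' : Int)

-- ===== PORT B =====
-- one pass with an explicit position counter (Python's enumerate); state = (last_active, count, p)
def solve_alt (string : String) (k : Int) : Int :=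
  (string.toList.foldl
    (fun (st : PySem.Dict Char Int × Int × Int) c =>
      let d := st.1; let cnt := st.2.1; let p := st.2.2
      if c = '#' then (d, cnt + 1, p + 1)
      else
        match d.get? c with
        | some q => if p - q ≤ k - 1 then (d, cnt + 1, p + 1) else (d.insert c p, cnt, p + 1)
        | none => (d.insert c p, cnt, p + 1))
    (PySem.Dict.empty, 0, 0)).2.1

-- ===== PRECONDITION & SPEC =====
-- Pre_ excludes negative k, outside the natural domain of a window length; there Python's
-- negative slice bounds make A read string[i:i+k] as a large window counted from the end.
def Pre_solve (string : String) (k : Int) : Prop := 0 ≤ k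
instance (string : String) (k : Int) : Decidable (Pre_solve string k) := by unfold Pre_solve; infer_instance
def pvWitness_solve : String × Int := ("aab", 2)

def Spec_solve (string : String) (k : Int) (out : Int) : Prop := out = solve_alt string k
instance (string : String) (k : Int) (out : Int) : Decidable (Spec_solve string k out) := by unfold Spec_solve; infer_instance

-- ===== CLAIM (what is proved, stated in full; the proofs are below) =====
def Claim_equal_solve : Prop := ∀ (string : String) (k : Int), Dom_solve string k → Pre_solve string k → Spec_solve string k (solve string k)

-- ===== LEMMAS AND PROOFS =====

-- position j (of char c ≠ '#') is marked iff some unmarked earlier equal char is within distance k-1;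
-- F is the finished prefix of the final string, so 'F.getD q = c' says q holds c and is unmarked.
abbrev pvMarked (k : Int) (F : List Char) (i : Nat) (c : Char) (j : Nat) : Prop :=
  ∃ q, q < i ∧ F.getD q ' ' = c ∧ (j : Int) - (q : Int) ≤ k - 1

def pvStep (k : Int) (acc : List Char) (c : Char) : List Char :=
  acc ++ [if c = '#' then '#' else if pvMarked k acc acc.length c acc.length then '#' else c]

-- the final string A's loop produces, built left to right
def pvF (k : Int) (o : List Char) : List Char := o.foldl (pvStep k) []

-- the list after A has processed window starts 0..i-1: position j carries '#' iff it is an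
-- original '#' or some finished source q < min i j marks it
def pvg (k : Int) (o : List Char) (i j : Nat) : Char :=
  if o.getD j ' ' = '#' then '#'
  else if pvMarked k (pvF k o) (min i j) (o.getD j ' ') j then '#'
  else o.getD j ' '

def pvG (k : Int) (o : List Char) (i : Nat) : List Char := (List.range o.length).map (pvg k o i)

-- greatest index of l holding c (B's last_active), as the Int Python stores
def lastIdx? (l : List Char) (c : Char) : Option Int :=
  (List.range l.length).foldl (fun acc q => if l.getD q ' ' = c then some (q : Int) else acc) none

theorem pvF_append (k : Int) (o m : List Char) :
    pvF k (o ++ m) = m.foldl (pvStep k) (pvF k o) := by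
  simp [pvF, List.foldl_append]

theorem foldl_pvStep_prefix (k : Int) (m : List Char) (acc : List Char) :
    acc <+: m.foldl (pvStep k) acc := by
  induction m generalizing acc with
  | nil => exact List.prefix_refl _
  | cons x t ih =>
      simp only [List.foldl_cons]
      exact List.IsPrefix.trans (by simp [pvStep]) (ih _)

theorem length_pvF (k : Int) (o : List Char) : (pvF k o).length = o.length := by
  induction o using List.reverseRecOn with
  | nil => rfl
  | append_singleton t x ih => simp [pvF_append, pvStep, List.foldl_cons, ih]

theorem pvF_take (k : Int) (o : List Char) (j : Nat) :
    pvF k (o.take j) = (pvF k o).take j := by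
  by_cases h : o.length ≤ j
  · simp [List.take_of_length_le, h, List.take_of_length_le, length_pvF]
  · have hsplit : o = o.take j ++ o.drop j := (List.take_append_drop j o).symm
    have hpre : pvF k (o.take j) <+: pvF k o := by
      conv_rhs => rw [hsplit]
      rw [pvF_append]
      exact foldl_pvStep_prefix _ _ _
    obtain ⟨r, hr⟩ := hpre
    have hlen : (pvF k (o.take j)).length = j := by
      rw [length_pvF, List.length_take]; omega
    rw [← hr, List.take_left' hlen]

theorem getD_pvF_take (k : Int) (o : List Char) {q j : Nat} (hq : q < j) :
    (pvF k (o.take j)).getD q ' ' = (pvF k o).getD q ' ' := by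
  rw [pvF_take]
  by_cases h : q < (pvF k o).length
  · rw [List.getD_eq_getElem _ _ (by rw [List.length_take]; omega),
        List.getD_eq_getElem _ _ h, List.getElem_take]
  · rw [List.getD_eq_default _ _ (by rw [List.length_take]; omega),
        List.getD_eq_default _ _ (by omega)]

theorem pvg_hash (k : Int) (o : List Char) {i j : Nat} (h : o.getD j ' ' = '#') :
    pvg k o i j = '#' := by
  unfold pvg
  rw [if_pos h]

theorem pvg_marked (k : Int) (o : List Char) {i j : Nat}
    (hm : pvMarked k (pvF k o) (min i j) (o.getD j ' ') j) : pvg k o i j = '#' := by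
  unfold pvg
  by_cases h : o.getD j ' ' = '#'
  · rw [if_pos h]
  · rw [if_neg h, if_pos hm]

theorem pvg_plain (k : Int) (o : List Char) {i j : Nat} (hc : o.getD j ' ' ≠ '#')
    (hm : ¬ pvMarked k (pvF k o) (min i j) (o.getD j ' ') j) : pvg k o i j = o.getD j ' ' := by
  unfold pvg
  rw [if_neg hc, if_neg hm]

-- the j-th final char is exactly pvg at (j, j)
theorem pvF_getD_eq_pvg (k : Int) (o : List Char) {j : Nat} (hj : j < o.length) :
    (pvF k o).getD j ' ' = pvg k o j j := by
  have hsplit : o = o.take j ++ o.getD j ' ' :: o.drop (j + 1) := by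
    conv_lhs => rw [← List.take_append_drop j o]
    congr 1
    rw [List.getD_eq_getElem _ _ hj]
    exact List.drop_eq_getElem_cons hj
  have hlen : (o.take j).length = j := by simp [Nat.min_eq_left hj.le]
  have hFlen : (pvF k (o.take j)).length = j := by rw [length_pvF, hlen]
  conv_lhs => rw [hsplit]
  rw [pvF_append, List.foldl_cons]
  have hpre := foldl_pvStep_prefix k (o.drop (j + 1)) (pvStep k (pvF k (o.take j)) (o.getD j ' '))
  obtain ⟨r, hr⟩ := hpre
  rw [← hr]
  have hmark : pvMarked k (pvF k (o.take j)) j (o.getD j ' ') j ↔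
      pvMarked k (pvF k o) j (o.getD j ' ') j := by
    unfold pvMarked
    constructor
    · rintro ⟨q, hq, he, hd⟩; exact ⟨q, hq, by rw [← getD_pvF_take k o hq]; exact he, hd⟩
    · rintro ⟨q, hq, he, hd⟩; exact ⟨q, hq, by rw [getD_pvF_take k o hq]; exact he, hd⟩
  simp only [pvStep]
  rw [List.append_assoc, List.getD_append_right _ _ _ _ (le_of_eq hFlen), hFlen, Nat.sub_self,
      List.singleton_append, List.getD_cons_zero]
  by_cases hc : o.getD j ' ' = '#'
  · rw [if_pos hc, pvg_hash k o hc]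
  · rw [if_neg hc]
    by_cases hm : pvMarked k (pvF k (o.take j)) j (o.getD j ' ') j
    · rw [if_pos hm, pvg_marked k o (by rw [Nat.min_self]; exact hmark.mp hm)]
    · rw [if_neg hm, pvg_plain k o hc (by rw [Nat.min_self]; exact fun h => hm (hmark.mpr h))]

theorem pvg_stable (k : Int) (o : List Char) {i j : Nat} (hj : j ≤ i) :
    pvg k o i j = pvg k o j j := by
  simp [pvg, Nat.min_eq_right hj]

theorem length_pvG (k : Int) (o : List Char) (i : Nat) : (pvG k o i).length = o.length := by
  simp [pvG]

theorem pvG_getElem (k : Int) (o : List Char) (i : Nat) {j : Nat} (hj : j < (pvG k o i).length) :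
    (pvG k o i)[j] = pvg k o i j := by
  simp [pvG]

theorem pvG_zero (k : Int) (o : List Char) : pvG k o 0 = o := by
  apply List.ext_getElem (by simp [length_pvG])
  intro j h1 h2
  rw [pvG_getElem]
  simp only [pvg, pvMarked, Nat.min_eq_left (Nat.zero_le j)]
  have : ¬ ∃ q, q < 0 ∧ (pvF k o).getD q ' ' = o.getD j ' ' ∧ (j : Int) - (q : Int) ≤ k - 1 := by
    rintro ⟨q, hq, -⟩; omega
  rw [List.getD_eq_getElem _ _ h2]
  by_cases hc : o[j] = '#' <;> simp [hc]

theorem pvG_length_eq_pvF (k : Int) (o : List Char) : pvG k o o.length = pvF k o := by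
  apply List.ext_getElem (by simp [length_pvG, length_pvF])
  intro j h1 h2
  have hj : j < o.length := by simpa [length_pvG] using h1
  rw [pvG_getElem, pvg_stable k o hj.le, ← pvF_getD_eq_pvg k o hj, List.getD_eq_getElem _ _ h2]

-- ---------- the inner marking loop ----------

theorem solveMark_nil : solveMark [] = [] := by
  simp [solveMark]

def pvMarkF (h : Char) (x : Char) : Char := if x = h then '#' else x

theorem innerNat_spec (h : Char) (t rest : List Char) (m : Nat) (hm : m ≤ t.length) :
    (List.range m).foldl
      (fun s q => if s.getD (q + 1) ' ' = s.getD 0 ' ' then s.set (q + 1) '#' else s)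
      (h :: (t ++ rest))
    = h :: ((t.take m).map (pvMarkF h) ++ t.drop m ++ rest) := by
  induction m with
  | zero => simp
  | succ m ih =>
      rw [List.range_succ, List.foldl_append, ih (by omega), List.foldl_cons, List.foldl_nil]
      have hmt : m < t.length := hm
      have hd : t.drop m = t[m] :: t.drop (m + 1) := List.drop_eq_getElem_cons hmt
      have hlen : ((t.take m).map (pvMarkF h)).length = m := by
        rw [List.length_map, List.length_take]; omega
      have hget : (h :: ((t.take m).map (pvMarkF h) ++ t.drop m ++ rest)).getD (m + 1) ' ' = t[m] := by
        rw [List.getD_cons_succ,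
            List.getD_append _ _ _ _ (by rw [List.length_append, hlen, List.length_drop]; omega),
            List.getD_append_right _ _ _ _ (le_of_eq hlen), hlen, Nat.sub_self, hd,
            List.getD_cons_zero]
      have htake : t.take (m + 1) = t.take m ++ [t[m]] := by
        rw [List.take_add_one, List.getElem?_eq_getElem hmt]; rfl
      by_cases heq : t[m] = h
      · rw [if_pos (by rw [hget, List.getD_cons_zero, heq])]
        rw [htake, List.set_cons_succ,
            List.set_append_left _ _ (by rw [List.length_append, hlen, List.length_drop]; omega),
            List.set_append_right _ _ (le_of_eq hlen), hlen, Nat.sub_self, hd,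
            List.set_cons_zero]
        simp [pvMarkF, heq, List.append_assoc]
      · rw [if_neg (by rw [hget, List.getD_cons_zero]; exact fun hh => heq hh)]
        rw [htake, hd]
        simp only [List.map_append, List.map_cons, List.map_nil, pvMarkF, if_neg heq]
        simp [List.append_assoc]

theorem solveMark_cons (h : Char) (t : List Char) :
    solveMark (h :: t) = h :: t.map (pvMarkF h) := by
  have hrange : PySem.List.pyRange 1 (((h :: t).length : Nat) : Int) =
      (List.range t.length).map (fun q => ((q + 1 : Nat) : Int)) := by
    rw [PySem.List.pyRange_one]
    have : ((((h :: t).length : Nat) : Int) - 1).toNat = t.length := by simp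
    rw [this]
    apply List.map_congr_left
    intro q hq
    push_cast; ring
  rw [solveMark, hrange, List.foldl_map]
  have hconv : ∀ (s : List Char) (q : Nat),
      (if PySem.List.pyGetD s (((q + 1 : Nat) : Int)) ' ' = PySem.List.pyGetD s 0 ' '
       then s.set (((q + 1 : Nat) : Int)).toNat '#' else s)
      = (if s.getD (q + 1) ' ' = s.getD 0 ' ' then s.set (q + 1) '#' else s) := by
    intro s q
    rw [PySem.List.pyGetD_natCast]
    have h0 : PySem.List.pyGetD s (0 : Int) ' ' = s.getD 0 ' ' := by
      have := PySem.List.pyGetD_natCast s 0 ' '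
      simpa using this
    rw [h0, Int.toNat_natCast]
  rw [PySem.List.foldl_congr_mem _ _ _ _ (fun s q _ => hconv s q)]
  have := innerNat_spec h t [] t.length (le_refl _)
  simpa using this

-- ---------- getD plumbing ----------

theorem pvExtGetD {l₁ l₂ : List Char} (hlen : l₁.length = l₂.length)
    (h : ∀ j, j < l₁.length → l₁.getD j ' ' = l₂.getD j ' ') : l₁ = l₂ := by
  apply List.ext_getElem hlen
  intro j h1 h2
  have := h j h1
  rwa [List.getD_eq_getElem _ _ h1, List.getD_eq_getElem _ _ h2] at this

theorem pvGetD_take {l : List Char} {i j : Nat} (h : j < i) (d : Char) :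
    (l.take i).getD j d = l.getD j d := by
  by_cases hj : j < l.length
  · rw [List.getD_eq_getElem _ _ (by rw [List.length_take]; omega),
        List.getD_eq_getElem _ _ hj, List.getElem_take]
  · rw [List.getD_eq_default _ _ (by rw [List.length_take]; omega),
        List.getD_eq_default _ _ (by omega)]

theorem pvGetD_drop {l : List Char} {i j : Nat} (d : Char) :
    (l.drop i).getD j d = l.getD (i + j) d := by
  by_cases hj : i + j < l.length
  · rw [List.getD_eq_getElem _ _ (by rw [List.length_drop]; omega),
        List.getD_eq_getElem _ _ hj, List.getElem_drop]
  · rw [List.getD_eq_default _ _ (by rw [List.length_drop]; omega),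
        List.getD_eq_default _ _ (by omega)]

theorem pvG_getD (k : Int) (o : List Char) (m : Nat) {j : Nat} (h : j < o.length) :
    (pvG k o m).getD j ' ' = pvg k o m j := by
  rw [List.getD_eq_getElem _ _ (by rw [length_pvG]; exact h), pvG_getElem]

-- ---------- how pvg evolves when source i is processed ----------

theorem pvMarked_succ_mono (k : Int) (F : List Char) (i : Nat) (c : Char) (j : Nat)
    (h : pvMarked k F i c j) : pvMarked k F (i + 1) c j := by
  obtain ⟨q, hq, he, hd⟩ := h
  exact ⟨q, by omega, he, hd⟩

theorem pvMarked_succ_elim (k : Int) (F : List Char) (i : Nat) (c : Char) (j : Nat)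
    (h : pvMarked k F (i + 1) c j) : pvMarked k F i c j ∨ (F.getD i ' ' = c ∧ (j : Int) - (i : Int) ≤ k - 1) := by
  obtain ⟨q, hq, he, hd⟩ := h
  rcases Nat.lt_succ_iff_lt_or_eq.mp hq with h' | h'
  · exact Or.inl ⟨q, h', he, hd⟩
  · subst h'; exact Or.inr ⟨he, hd⟩

theorem pvg_succ_far (k : Int) (o : List Char) {i j : Nat} (hij : i < j)
    (hfar : ¬ ((j : Int) - (i : Int) ≤ k - 1)) : pvg k o (i + 1) j = pvg k o i j := by
  have hmin1 : min (i + 1) j = i + 1 := by omega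
  have hmin0 : min i j = i := by omega
  by_cases hc : o.getD j ' ' = '#'
  · rw [pvg_hash k o (i := i + 1) (j := j) hc, pvg_hash k o (i := i) (j := j) hc]
  · by_cases hm : pvMarked k (pvF k o) i (o.getD j ' ') j
    · rw [pvg_marked k o (i := i + 1) (j := j) (by rw [hmin1]; exact pvMarked_succ_mono _ _ _ _ _ hm),
          pvg_marked k o (i := i) (j := j) (by rw [hmin0]; exact hm)]
    · rw [pvg_plain k o (i := i + 1) (j := j) hc (by
          rw [hmin1]
          intro h
          rcases pvMarked_succ_elim _ _ _ _ _ h with h' | ⟨-, h'⟩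
          · exact hm h'
          · exact hfar h'),
          pvg_plain k o (i := i) (j := j) hc (by rw [hmin0]; exact hm)]

theorem pvg_succ_near (k : Int) (o : List Char) {i j : Nat} (hij : i < j) (hi : i < o.length)
    (hnear : (j : Int) - (i : Int) ≤ k - 1) :
    pvg k o (i + 1) j = pvMarkF (pvg k o i i) (pvg k o i j) := by
  have hmin1 : min (i + 1) j = i + 1 := by omega
  have hmin0 : min i j = i := by omega
  have hFieq : (pvF k o).getD i ' ' = pvg k o i i := by
    rw [pvF_getD_eq_pvg k o hi, pvg_stable k o (le_refl i)]
  by_cases hc : o.getD j ' ' = '#'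
  · rw [pvg_hash k o (i := i + 1) (j := j) hc, pvg_hash k o (i := i) (j := j) hc]
    simp [pvMarkF]
  · by_cases hm : pvMarked k (pvF k o) i (o.getD j ' ') j
    · rw [pvg_marked k o (i := i + 1) (j := j) (by rw [hmin1]; exact pvMarked_succ_mono _ _ _ _ _ hm),
          pvg_marked k o (i := i) (j := j) (by rw [hmin0]; exact hm)]
      simp [pvMarkF]
    · rw [pvg_plain k o (i := i) (j := j) hc (by rw [hmin0]; exact hm)]
      by_cases hq : o.getD j ' ' = pvg k o i i
      · rw [pvg_marked k o (i := i + 1) (j := j) (by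
          rw [hmin1]
          exact ⟨i, by omega, by rw [hFieq]; exact hq.symm, hnear⟩)]
        simp only [pvMarkF]; rw [if_pos hq]
      · rw [pvg_plain k o (i := i + 1) (j := j) hc (by
          rw [hmin1]
          intro h
          rcases pvMarked_succ_elim _ _ _ _ _ h with h' | ⟨he, -⟩
          · exact hm h'
          · exact hq (by rw [← hFieq]; exact he.symm))]
        simp only [pvMarkF]; rw [if_neg hq]

-- ---------- the window step ----------

theorem solveBody_step (k : Int) (hk : 0 ≤ k) (o : List Char) (i : Nat) (hi : i < o.length) :
    solveBody k (pvG k o i) i = pvG k o (i + 1) := by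
  have hlen : (pvG k o i).length = o.length := length_pvG k o i
  set L := pvG k o i with hL
  set w : Nat := min k.toNat (o.length - i) with hw
  have hik : ((i : Int) + k).toNat = i + k.toNat := by omega
  have hsub : PySem.List.slice L (some (i : Int)) (some ((i : Int) + k)) = (L.drop i).take w := by
    rw [PySem.List.slice_toNat L (by positivity) (by omega), Int.toNat_natCast, hik]
    have hdlen : (L.drop i).length = o.length - i := by rw [List.length_drop, hlen]
    by_cases hc : k.toNat ≤ o.length - i
    · congr 1; omega
    · rw [List.take_of_length_le (by omega), List.take_of_length_le (by omega)]
  have hlo : PySem.List.clampIdx L.length (i : Int) = i := by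
    rw [hlen, PySem.List.clampIdx_natCast]; omega
  have hhi' : max i (PySem.List.clampIdx L.length ((i : Int) + k)) = i + w := by
    rw [hlen]
    have : ((i : Int) + k) = ((i + k.toNat : Nat) : Int) := by omega
    rw [this, PySem.List.clampIdx_natCast]
    omega
  have hLget : ∀ j, j < o.length → L.getD j ' ' = pvg k o i j := fun j h => pvG_getD k o i h
  rw [solveBody, hsub, solveAssign]
  simp only [hlo]
  rw [hhi']
  rcases Nat.eq_zero_or_pos w with hw0 | hwpos
  · -- empty window (k = 0): the step is a no-op and source i reaches nothing
    rw [hw0, List.take_zero, solveMark_nil, List.append_nil, Nat.add_zero,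
        List.take_append_drop]
    have hk0 : k.toNat = 0 := by omega
    apply pvExtGetD (by rw [hlen, length_pvG])
    intro j hj'
    have hj : j < o.length := by rwa [hlen] at hj'
    rw [hLget j hj, pvG_getD k o (i + 1) hj]
    rcases Nat.lt_or_ge i j with hji | hji
    · rw [pvg_succ_far k o hji (by omega)]
    · rw [pvg_stable k o (by omega : j ≤ i), pvg_stable k o (by omega : j ≤ i + 1)]
  · -- nonempty window
    have hiw : i + w ≤ o.length := by omega
    have hwk : w ≤ k.toNat := by omega
    have hdrop : L.drop i = L[i]'(by omega) :: L.drop (i + 1) := List.drop_eq_getElem_cons (by omega)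
    have hhead : L[i]'(by omega) = pvg k o i i := by
      have := hLget i hi
      rwa [List.getD_eq_getElem _ _ (by omega)] at this
    have hsub_cons : (L.drop i).take w = pvg k o i i :: ((L.drop (i + 1)).take (w - 1)) := by
      rw [hdrop, hhead]
      obtain ⟨w', hw'⟩ : ∃ w', w = w' + 1 := ⟨w - 1, by omega⟩
      rw [hw', List.take_succ_cons]
      simp
    rw [hsub_cons, solveMark_cons]
    have htlen : (L.take i).length = i := by rw [List.length_take]; omega
    have hmlen : (((L.drop (i + 1)).take (w - 1)).map (pvMarkF (pvg k o i i))).length = w - 1 := by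
      rw [List.length_map, List.length_take, List.length_drop, hlen]; omega
    have hPlen : (L.take i ++ pvg k o i i :: ((L.drop (i + 1)).take (w - 1)).map (pvMarkF (pvg k o i i))).length = i + w := by
      rw [List.length_append, htlen, List.length_cons, hmlen]; omega
    apply pvExtGetD
    · rw [List.length_append, hPlen, List.length_drop, hlen, length_pvG]; omega
    intro j hj'
    have hj : j < o.length := by
      rw [List.length_append, hPlen, List.length_drop, hlen] at hj'; omega
    rw [pvG_getD k o (i + 1) hj]
    rcases Nat.lt_or_ge j i with hji | hji
    · -- untouched prefix
      rw [List.getD_append _ _ _ _ (by rw [hPlen]; omega),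
          List.getD_append _ _ _ _ (by rw [htlen]; omega),
          pvGetD_take hji, hLget j hj,
          pvg_stable k o (by omega : j ≤ i), pvg_stable k o (by omega : j ≤ i + 1)]
    rcases Nat.eq_or_lt_of_le hji with hji' | hji'
    · -- the window head is written back unchanged
      subst hji'
      rw [List.getD_append _ _ _ _ (by rw [hPlen]; omega),
          List.getD_append_right _ _ _ _ (le_of_eq htlen), htlen, Nat.sub_self,
          List.getD_cons_zero, pvg_stable k o (by omega : i ≤ i + 1)]
    rcases Nat.lt_or_ge j (i + w) with hjw | hjw
    · -- inside the window: marked iff equal to the head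
      rw [List.getD_append _ _ _ _ (by rw [hPlen]; omega),
          List.getD_append_right _ _ _ _ (by rw [htlen]; omega), htlen]
      have hsplit : j - i = (j - i - 1) + 1 := by omega
      rw [hsplit, List.getD_cons_succ]
      have hval : (((L.drop (i + 1)).take (w - 1)).map (pvMarkF (pvg k o i i))).getD (j - i - 1) ' '
          = pvMarkF (pvg k o i i) (pvg k o i j) := by
        rw [List.getD_eq_getElem _ _ (by rw [hmlen]; omega), List.getElem_map, List.getElem_take,
            List.getElem_drop]
        congr 1
        have hidx : i + 1 + (j - i - 1) = j := by omega
        have := hLget j hj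
        rw [List.getD_eq_getElem _ _ (by omega)] at this
        simp_rw [hidx]
        exact this
      rw [hval, pvg_succ_near k o (by omega) hi (by omega)]
    · -- untouched suffix: source i is too far away
      rw [List.getD_append_right _ _ _ _ (by rw [hPlen]; omega), hPlen, pvGetD_drop]
      have hidx2 : i + w + (j - (i + w)) = j := by omega
      rw [hidx2, hLget j hj]
      have hfar : ¬ ((j : Int) - (i : Int) ≤ k - 1) := by
        have : w = k.toNat ∨ w = o.length - i := by omega
        rcases this with h' | h' <;> omega
      rw [pvg_succ_far k o (by omega) hfar]

-- ---------- A computes pvF ----------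

theorem solve_loop (k : Int) (hk : 0 ≤ k) (o : List Char) (m : Nat) (hm : m ≤ o.length) :
    (List.range m).foldl (solveBody k) o = pvG k o m := by
  induction m with
  | zero => simp [pvG_zero]
  | succ m ih =>
      rw [List.range_succ, List.foldl_append, ih (by omega), List.foldl_cons, List.foldl_nil]
      exact solveBody_step k hk o m (by omega)

theorem solve_eq_pvF (string : String) (k : Int) (hk : 0 ≤ k) :
    solve string k = (PySem.List.count (pvF k string.toList) '#' : Int) := by
  show (PySem.List.count ((List.range string.toList.length).foldl (solveBody k) string.toList) '#' : Int) = _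
  rw [solve_loop k hk string.toList string.toList.length (le_refl _), pvG_length_eq_pvF]

-- ---------- lastIdx? ----------

theorem lastIdx?_append_singleton (l : List Char) (x : Char) (c : Char) :
    lastIdx? (l ++ [x]) c = if x = c then some ((l.length : Nat) : Int) else lastIdx? l c := by
  rw [lastIdx?, lastIdx?]
  have hlen : (l ++ [x]).length = l.length + 1 := by simp
  rw [hlen, List.range_succ, List.foldl_append, List.foldl_cons, List.foldl_nil]
  have hcong : (List.range l.length).foldl
      (fun acc q => if (l ++ [x]).getD q ' ' = c then some (q : Int) else acc) none
      = (List.range l.length).foldl (fun acc q => if l.getD q ' ' = c then some (q : Int) else acc) none := by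
    apply PySem.List.foldl_congr_mem
    intro acc q hq
    rw [List.getD_append _ _ _ _ (List.mem_range.mp hq)]
  rw [hcong, List.getD_append_right _ _ _ _ (le_refl _), Nat.sub_self, List.getD_cons_zero]

theorem lastIdx?_spec (l : List Char) (c : Char) {z : Int} (h : lastIdx? l c = some z) :
    ∃ q : Nat, z = (q : Int) ∧ q < l.length ∧ l.getD q ' ' = c ∧
      ∀ r, r < l.length → l.getD r ' ' = c → r ≤ q := by
  induction l using List.reverseRecOn with
  | nil => simp [lastIdx?] at h
  | append_singleton t x ih =>
      rw [lastIdx?_append_singleton] at h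
      by_cases hx : x = c
      · rw [if_pos hx] at h
        refine ⟨t.length, by simpa using h.symm, by simp, ?_, ?_⟩
        · rw [List.getD_append_right _ _ _ _ (le_refl _), Nat.sub_self, List.getD_cons_zero]
          exact hx
        · intro r hr _; simp at hr; omega
      · rw [if_neg hx] at h
        obtain ⟨q, hz, hq, he, hmax⟩ := ih h
        refine ⟨q, hz, by simp; omega, ?_, ?_⟩
        · rw [List.getD_append _ _ _ _ hq]; exact he
        · intro r hr hrc
          simp at hr
          rcases Nat.lt_succ_iff_lt_or_eq.mp (by omega : r < t.length + 1) with h' | h'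
          · apply hmax r h'
            rw [List.getD_append _ _ _ _ h'] at hrc
            exact hrc
          · exfalso
            subst h'
            rw [List.getD_append_right _ _ _ _ (le_refl _), Nat.sub_self,
                List.getD_cons_zero] at hrc
            exact hx hrc

theorem lastIdx?_none (l : List Char) (c : Char) (h : lastIdx? l c = none) :
    ∀ r, r < l.length → l.getD r ' ' ≠ c := by
  induction l using List.reverseRecOn with
  | nil => intro r hr; simp at hr
  | append_singleton t x ih =>
      rw [lastIdx?_append_singleton] at h
      by_cases hx : x = c
      · rw [if_pos hx] at h; exact absurd h (by simp)
      · rw [if_neg hx] at h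
        intro r hr
        simp at hr
        rcases Nat.lt_succ_iff_lt_or_eq.mp (show r < t.length + 1 by omega) with h' | h'
        · rw [List.getD_append _ _ _ _ h']; exact ih h r h'
        · subst h'
          rw [List.getD_append_right _ _ _ _ (le_refl _), Nat.sub_self, List.getD_cons_zero]
          exact hx

-- ---------- B computes the same count ----------

def pvBStep (k : Int) (st : PySem.Dict Char Int × Int × Int) (c : Char) : PySem.Dict Char Int × Int × Int :=
  let d := st.1; let cnt := st.2.1; let p := st.2.2
  if c = '#' then (d, cnt + 1, p + 1)
  else
    match d.get? c with
    | some q => if p - q ≤ k - 1 then (d, cnt + 1, p + 1) else (d.insert c p, cnt, p + 1)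
    | none => (d.insert c p, cnt, p + 1)

def pvBInv (k : Int) (o : List Char) (st : PySem.Dict Char Int × Int × Int) : Prop :=
  st.2.2 = (o.length : Int) ∧ st.2.1 = (List.count '#' (pvF k o) : Int) ∧
    ∀ c, c ≠ '#' → st.1.get? c = lastIdx? (pvF k o) c

theorem pvB_loop (k : Int) (o : List Char) :
    pvBInv k o (o.foldl (pvBStep k) (PySem.Dict.empty, 0, 0)) := by
  induction o using List.reverseRecOn with
  | nil =>
      refine ⟨rfl, rfl, ?_⟩
      intro c _
      rfl
  | append_singleton t x ih =>
      obtain ⟨hp, hcnt, hd⟩ := ih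
      rw [List.foldl_append, List.foldl_cons, List.foldl_nil]
      set st := t.foldl (pvBStep k) (PySem.Dict.empty, 0, 0) with hst
      have hFsnoc : pvF k (t ++ [x]) = pvF k t ++
          [if x = '#' then '#' else if pvMarked k (pvF k t) (pvF k t).length x (pvF k t).length then '#' else x] := by
        rw [pvF_append, List.foldl_cons, List.foldl_nil, pvStep]
      have hFlen : (pvF k t).length = t.length := length_pvF k t
      have hlenInt : ((t ++ [x]).length : Int) = (t.length : Int) + 1 := by
        rw [List.length_append]; push_cast; simp
      by_cases hx : x = '#'
      · subst hx
        have hF : pvF k (t ++ ['#']) = pvF k t ++ ['#'] := by rw [hFsnoc, if_pos rfl]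
        have hstep : pvBStep k st '#' = (st.1, st.2.1 + 1, st.2.2 + 1) := by
          simp [pvBStep]
        rw [hstep]
        refine ⟨?_, ?_, ?_⟩
        · show st.2.2 + 1 = ((t ++ ['#']).length : Int)
          rw [hlenInt, hp]
        · show st.2.1 + 1 = (List.count '#' (pvF k (t ++ ['#'])) : Int)
          rw [hF, List.count_append, hcnt]
          have : List.count '#' ['#'] = 1 := rfl
          rw [this]
          push_cast; ring
        · intro c hc
          show st.1.get? c = lastIdx? (pvF k (t ++ ['#'])) c
          rw [hF, lastIdx?_append_singleton, if_neg (fun h => hc h.symm), hd c hc]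
      · have hcx0 : List.count '#' [x] = 0 := by
          rw [List.count_singleton]
          simp [hx]
        set v := if pvMarked k (pvF k t) (pvF k t).length x (pvF k t).length then '#' else x with hv
        have hF : pvF k (t ++ [x]) = pvF k t ++ [v] := by rw [hFsnoc, if_neg hx]
        rcases hq : st.1.get? x with _ | q
        · -- no active occurrence of x: nothing marks it; it becomes the active one
          have hnone : lastIdx? (pvF k t) x = none := by rw [← hd x hx]; exact hq
          have hnm : ¬ pvMarked k (pvF k t) (pvF k t).length x (pvF k t).length := by
            rintro ⟨r, hr, he, -⟩
            exact lastIdx?_none _ _ hnone r hr he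
          have hvx : v = x := by rw [hv, if_neg hnm]
          have hstep : pvBStep k st x = (st.1.insert x st.2.2, st.2.1, st.2.2 + 1) := by
            simp only [pvBStep, if_neg hx, hq]
          rw [hstep]
          refine ⟨?_, ?_, ?_⟩
          · show st.2.2 + 1 = ((t ++ [x]).length : Int)
            rw [hlenInt, hp]
          · show st.2.1 = (List.count '#' (pvF k (t ++ [x])) : Int)
            rw [hF, hvx, List.count_append, hcx0, hcnt]
            push_cast; ring
          · intro c hc
            show (st.1.insert x st.2.2).get? c = lastIdx? (pvF k (t ++ [x])) c
            rw [hF, hvx, lastIdx?_append_singleton, hFlen, ← hp]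
            by_cases hcx : c = x
            · subst hcx
              rw [if_pos rfl, PySem.Dict.get?_insert_self]
            · rw [if_neg (fun h => hcx h.symm), PySem.Dict.get?_insert_of_ne _ _ hcx, hd c hc]
        · have hsome : lastIdx? (pvF k t) x = some q := by rw [← hd x hx]; exact hq
          obtain ⟨qn, hqz, hqlt, hqe, hqmax⟩ := lastIdx?_spec _ _ hsome
          by_cases hgap : st.2.2 - q ≤ k - 1
          · -- the nearest active occurrence is within reach: x is marked
            have hm : pvMarked k (pvF k t) (pvF k t).length x (pvF k t).length := by
              refine ⟨qn, by omega, hqe, ?_⟩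
              rw [hp] at hgap
              rw [hFlen]
              omega
            have hvh : v = '#' := by rw [hv, if_pos hm]
            have hstep : pvBStep k st x = (st.1, st.2.1 + 1, st.2.2 + 1) := by
              simp only [pvBStep, if_neg hx, hq, if_pos hgap]
            rw [hstep]
            refine ⟨?_, ?_, ?_⟩
            · show st.2.2 + 1 = ((t ++ [x]).length : Int)
              rw [hlenInt, hp]
            · show st.2.1 + 1 = (List.count '#' (pvF k (t ++ [x])) : Int)
              rw [hF, hvh, List.count_append, hcnt]
              have : List.count '#' ['#'] = 1 := rfl
              rw [this]
              push_cast; ring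
            · intro c hc
              show st.1.get? c = lastIdx? (pvF k (t ++ [x])) c
              rw [hF, hvh, lastIdx?_append_singleton, if_neg (fun h => hc h.symm), hd c hc]
          · -- even the nearest active occurrence is too far: x survives and becomes active
            have hnm : ¬ pvMarked k (pvF k t) (pvF k t).length x (pvF k t).length := by
              rintro ⟨r, hr, he, hdist⟩
              have hrq : r ≤ qn := hqmax r hr he
              rw [hFlen] at hdist
              rw [hp] at hgap
              omega
            have hvx : v = x := by rw [hv, if_neg hnm]
            have hstep : pvBStep k st x = (st.1.insert x st.2.2, st.2.1, st.2.2 + 1) := by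
              simp only [pvBStep, if_neg hx, hq, if_neg hgap]
            rw [hstep]
            refine ⟨?_, ?_, ?_⟩
            · show st.2.2 + 1 = ((t ++ [x]).length : Int)
              rw [hlenInt, hp]
            · show st.2.1 = (List.count '#' (pvF k (t ++ [x])) : Int)
              rw [hF, hvx, List.count_append, hcx0, hcnt]
              push_cast; ring
            · intro c hc
              show (st.1.insert x st.2.2).get? c = lastIdx? (pvF k (t ++ [x])) c
              rw [hF, hvx, lastIdx?_append_singleton, hFlen, ← hp]
              by_cases hcx : c = x
              · subst hcx
                rw [if_pos rfl, PySem.Dict.get?_insert_self]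
              · rw [if_neg (fun h => hcx h.symm), PySem.Dict.get?_insert_of_ne _ _ hcx, hd c hc]

theorem solve_alt_eq_pvF (string : String) (k : Int) :
    solve_alt string k = (PySem.List.count (pvF k string.toList) '#' : Int) := by
  have h := pvB_loop k string.toList
  rw [solve_alt]
  have hfold : string.toList.foldl
      (fun (st : PySem.Dict Char Int × Int × Int) c =>
        let d := st.1; let cnt := st.2.1; let p := st.2.2
        if c = '#' then (d, cnt + 1, p + 1)
        else
          match d.get? c with
          | some q => if p - q ≤ k - 1 then (d, cnt + 1, p + 1) else (d.insert c p, cnt, p + 1)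
          | none => (d.insert c p, cnt, p + 1))
      (PySem.Dict.empty, 0, 0) = string.toList.foldl (pvBStep k) (PySem.Dict.empty, 0, 0) := rfl
  rw [hfold, h.2.1]
  rfl

-- ===== VERDICT (by name: the statement is the Claim_ definition above) =====
theorem solve_spec : Claim_equal_solve := by
  intro string k _ hpre
  unfold Spec_solve
  rw [solve_eq_pvF string k hpre, solve_alt_eq_pvF]
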